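-- pv_equiv track=rewrite | github.com/aki-k-no/Image2Schematic | src/mcimage2schem/voxelize.py | _majority_block
-- ===== SOURCE A (Python) =====
-- def _majority_block(blocks: list[str]) -> str:
--     counts: dict[str, int] = {}
--     winner = blocks[0]
--     best = 0
--     for block in blocks:
--         counts[block] = counts.get(block, 0) + 1
--         if counts[block] > best:
--             best = counts[block]
--             winner = block
--     return winner
-- ===== SOURCE B (Python) =====
-- def _majority_block(blocks: list[str]) -> str:
--     first = blocks[0]
--     counts: dict[str, int] = {}
--     for b in blocks:
--         counts[b] = counts.get(b, 0) + 1
--     m = max(counts.values())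
--     tally: dict[str, int] = {}
--     for b in blocks:
--         tally[b] = tally.get(b, 0) + 1
--         if tally[b] == m:
--             return b
--     return first
-- ===== Notes on version B (the rewrite author's own statement) =====
-- stated objective: alternative
-- what changed: Replaced A's single pass that maintains a running best/winner with a two-phase decomposition: build full counts first, take m = max(counts.values()), then a second running-tally pass returns the first block whose count reaches m (same first-to-reach-max tie-break).
-- outside the precondition, e.g. on _majority_block([]): A raises IndexError, B raises IndexError
import Mathlib
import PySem

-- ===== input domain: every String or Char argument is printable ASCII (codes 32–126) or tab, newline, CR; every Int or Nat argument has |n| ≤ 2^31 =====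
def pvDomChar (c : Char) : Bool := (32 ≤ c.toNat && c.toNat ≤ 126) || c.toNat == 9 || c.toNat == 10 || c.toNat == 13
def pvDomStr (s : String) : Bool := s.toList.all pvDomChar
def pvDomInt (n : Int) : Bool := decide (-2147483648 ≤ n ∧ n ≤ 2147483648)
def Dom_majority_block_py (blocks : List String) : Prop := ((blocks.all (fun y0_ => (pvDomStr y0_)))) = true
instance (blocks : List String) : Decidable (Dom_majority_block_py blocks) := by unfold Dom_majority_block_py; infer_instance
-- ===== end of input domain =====

-- B splits A's single running-best pass into a count-all phase plus a locate phase
-- (first block whose running tally reaches the global maximum): alternative decomposition, same result.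


-- ===== PORT A =====
def majority_block_py (blocks : List String) : String :=
  match blocks.head? with
  | none => ""   -- blocks[0] raises IndexError here; excluded by Pre_
  | some w0 =>
    (blocks.foldl
      (fun (st : PySem.Dict String Int × String × Int) block =>
        let counts := st.1.insert block (st.1.getD block 0 + 1)
        let c := counts.getD block 0
        if c > st.2.2 then (counts, block, c) else (counts, st.2.1, st.2.2))
      (PySem.Dict.empty, w0, 0)).2.1

-- ===== PORT B =====
-- second pass of B: return the first block whose running tally reaches m
def pvLocate (m : Int) : List String → PySem.Dict String Int → Option String
  | [], _ => none
  | b :: rest, tally =>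
    let tally' := tally.insert b (tally.getD b 0 + 1)
    if tally'.getD b 0 = m then some b else pvLocate m rest tally'

def majority_block_py_alt (blocks : List String) : String :=
  match blocks.head? with
  | none => ""   -- blocks[0] raises IndexError here; excluded by Pre_
  | some first =>
    let counts := blocks.foldl
      (fun (d : PySem.Dict String Int) b => d.insert b (d.getD b 0 + 1)) PySem.Dict.empty
    match PySem.List.max? counts.values (fun v => v) with
    | none => ""   -- max([]) raises; unreachable as blocks ≠ []
    | some m => (pvLocate m blocks PySem.Dict.empty).getD first

-- ===== PRECONDITION & SPEC =====
-- Pre_ excludes only the empty list, on which A raises IndexError (blocks[0]).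
def Pre_majority_block_py (blocks : List String) : Prop := blocks ≠ []
instance (blocks : List String) : Decidable (Pre_majority_block_py blocks) := by
  unfold Pre_majority_block_py; infer_instance

def pvWitness_majority_block_py : List String := ["a", "b", "a"]

def Spec_majority_block_py (blocks : List String) (out : String) : Prop := out = majority_block_py_alt blocks
instance (blocks : List String) (out : String) : Decidable (Spec_majority_block_py blocks out) := by unfold Spec_majority_block_py; infer_instance

-- ===== CLAIM (what is proved, stated in full; the proofs are below) =====
def Claim_equal_majority_block_py : Prop := ∀ (blocks : List String), Dom_majority_block_py blocks → Pre_majority_block_py blocks → Spec_majority_block_py blocks (majority_block_py blocks)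

-- ===== LEMMAS AND PROOFS =====

-- Pure (dict-free) version of A's loop: `seen` is the reversed processed prefix.
def pvGoA : List String → List String → String → Int → String
  | _, [], w, _ => w
  | seen, b :: r, w, best =>
    let c : Int := (seen.count b : Int) + 1
    if c > best then pvGoA (b :: seen) r b c else pvGoA (b :: seen) r w best

-- Pure version of B's locate loop.
def pvLocP (m : Int) : List String → List String → Option String
  | _, [] => none
  | seen, b :: r =>
    if ((seen.count b : Int) + 1 = m) then some b else pvLocP m (b :: seen) r

theorem pvGoA_eq_foldl (rest : List String) :
    ∀ (d : PySem.Dict String Int) (seen : List String) (w : String) (best : Int),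
    (∀ b, d.getD b 0 = (seen.count b : Int)) →
    (rest.foldl
      (fun (st : PySem.Dict String Int × String × Int) block =>
        let counts := st.1.insert block (st.1.getD block 0 + 1)
        let c := counts.getD block 0
        if c > st.2.2 then (counts, block, c) else (counts, st.2.1, st.2.2))
      (d, w, best)).2.1 = pvGoA seen rest w best := by
  induction rest with
  | nil => intro d seen w best _; simp [pvGoA]
  | cons b r ih =>
    intro d seen w best hinv
    have hnew : ∀ x, (d.insert b (d.getD b 0 + 1)).getD x 0 = ((b :: seen).count x : Int) := by
      intro x
      rw [PySem.Dict.getD_insert]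
      by_cases hx : x = b
      · subst hx; simp [hinv]
      · simp [hx, Ne.symm hx, hinv]
    simp only [List.foldl_cons, pvGoA]
    simp only [hinv b] at hnew
    rw [PySem.Dict.getD_insert_self, hinv b]
    split_ifs with h
    · exact ih _ (b :: seen) b _ hnew
    · exact ih _ (b :: seen) w best hnew

theorem pvLocP_eq_pvLocate (m : Int) (rest : List String) :
    ∀ (tally : PySem.Dict String Int) (seen : List String),
    (∀ b, tally.getD b 0 = (seen.count b : Int)) →
    pvLocate m rest tally = pvLocP m seen rest := by
  induction rest with
  | nil => intro tally seen _; simp [pvLocate, pvLocP]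
  | cons b r ih =>
    intro tally seen hinv
    have hnew : ∀ x, (tally.insert b (tally.getD b 0 + 1)).getD x 0 = ((b :: seen).count x : Int) := by
      intro x
      rw [PySem.Dict.getD_insert]
      by_cases hx : x = b
      · subst hx; simp [hinv]
      · simp [hx, Ne.symm hx, hinv]
    simp only [pvLocate, pvLocP]
    simp only [hinv b] at hnew
    rw [PySem.Dict.getD_insert_self, hinv b]
    split_ifs with h
    · rfl
    · exact ih _ (b :: seen) hnew

-- once `best` bounds every total count, A's loop never updates the winner again
theorem pvGoA_const (rest : List String) :
    ∀ (seen : List String) (w : String) (best : Int),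
    (∀ b, ((seen.count b + rest.count b : Nat) : Int) ≤ best) →
    pvGoA seen rest w best = w := by
  induction rest with
  | nil => intro seen w best _; simp [pvGoA]
  | cons b r ih =>
    intro seen w best hub
    have hb := hub b
    simp only [List.count_cons_self] at hb
    have hnotgt : ¬ ((seen.count b : Int) + 1 > best) := by push_cast at hb; omega
    simp only [pvGoA, if_neg hnotgt]
    apply ih
    intro x
    have := hub x
    simp only [List.count_cons] at this ⊢
    by_cases hx : x = b <;> simp [hx] at this ⊢ <;> omega

-- existence: some running tally reaches m inside `rest`
theorem pvLocP_isSome (m : Int) (rest : List String) :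
    ∀ (seen : List String),
    (∃ b, ((seen.count b : Nat) : Int) < m ∧ m ≤ ((seen.count b + rest.count b : Nat) : Int)) →
    (pvLocP m seen rest).isSome := by
  induction rest with
  | nil =>
    intro seen ⟨b, h1, h2⟩
    simp only [List.count_nil, Nat.add_zero] at h2; omega
  | cons b r ih =>
    intro seen ⟨x, h1, h2⟩
    simp only [pvLocP]
    split_ifs with h
    · rfl
    · refine ih (b :: seen) ⟨x, ?_, ?_⟩
      · simp only [List.count_cons, beq_iff_eq]
        rcases eq_or_ne b x with rfl | hx
        · push_cast
          omega
        · simp only [if_neg hx, Nat.add_zero]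
          exact h1
      · simp only [List.count_cons, beq_iff_eq] at h2 ⊢
        rcases eq_or_ne b x with rfl | hx
        · push_cast at h2 ⊢
          omega
        · simp only [if_neg hx, Nat.add_zero] at h2 ⊢
          exact h2

-- core: A's running-winner loop lands on the first block whose running count reaches m
theorem pvGoA_eq_pvLocP (m : Int) (rest : List String) :
    ∀ (seen : List String) (w : String) (best : Int),
    (∀ b, ((seen.count b : Nat) : Int) ≤ best) →
    best < m →
    (∀ b, ((seen.count b + rest.count b : Nat) : Int) ≤ m) →
    (pvLocP m seen rest).isSome →
    pvLocP m seen rest = some (pvGoA seen rest w best) := by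
  induction rest with
  | nil => intro seen w best _ _ _ hsome; simp [pvLocP] at hsome
  | cons b r ih =>
    intro seen w best hle hlt hub hsome
    simp only [pvLocP, pvGoA]
    by_cases hc : ((seen.count b : Int) + 1 = m)
    · rw [if_pos hc]
      have hgt : (seen.count b : Int) + 1 > best := by omega
      rw [if_pos hgt]
      rw [pvGoA_const]
      intro x
      have := hub x
      simp only [List.count_cons] at this ⊢
      by_cases hx : x = b <;> simp [hx] at this ⊢ <;> omega
    · rw [if_neg hc]
      simp only [pvLocP, if_neg hc] at hsome
      have hcb : (seen.count b : Int) + 1 < m := by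
        have := hub b
        simp only [List.count_cons_self] at this
        push_cast at this; omega
      have hub' : ∀ x, (((b :: seen).count x + r.count x : Nat) : Int) ≤ m := by
        intro x
        have := hub x
        simp only [List.count_cons] at this ⊢
        by_cases hx : x = b <;> simp [hx] at this ⊢ <;> omega
      split_ifs with hgt
      · apply ih (b :: seen) b ((seen.count b : Int) + 1) ?_ hcb hub' hsome
        intro x
        have := hle x
        simp only [List.count_cons]
        rcases eq_or_ne x b with rfl | hx
        · simp
        · simp [Ne.symm hx]
          push_cast at this hgt ⊢; omega
      · apply ih (b :: seen) w best ?_ hlt hub' hsome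
        intro x
        have := hle x
        simp only [List.count_cons]
        rcases eq_or_ne x b with rfl | hx
        · simp
          omega
        · simp [Ne.symm hx]
          push_cast at this ⊢; omega

-- ===== VERDICT (by name: the statement is the Claim_ definition above) =====
theorem majority_block_py_spec : Claim_equal_majority_block_py := by
  intro blocks _ hpre
  unfold Spec_majority_block_py majority_block_py majority_block_py_alt
  obtain ⟨b0, t, rfl⟩ : ∃ b0 t, blocks = b0 :: t := by
    cases blocks with
    | nil => exact absurd rfl hpre
    | cons b0 t => exact ⟨b0, t, rfl⟩
  simp only [List.head?_cons]
  -- the counting fold is Counter(blocks)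
  rw [show ((b0 :: t).foldl
      (fun (d : PySem.Dict String Int) b => d.insert b (d.getD b 0 + 1)) PySem.Dict.empty)
      = PySem.Dict.counter (b0 :: t) from
    PySem.Dict.foldl_insert_getD_add_one_eq_counter (b0 :: t)]
  -- max? is some m
  have hval : (PySem.Dict.counter (b0 :: t)).values
      = (PySem.Set.ofList (b0 :: t)).map (fun k => (((b0 :: t).count k : Nat) : Int)) := by
    show ((PySem.Dict.counter (b0 :: t)).items).map (·.2) = _
    rw [PySem.Dict.items_counter]
    simp [List.map_map, Function.comp]
  have hne : (PySem.Dict.counter (b0 :: t)).values ≠ [] := by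
    rw [hval]
    intro h
    have hb0 : b0 ∈ PySem.Set.ofList (b0 :: t) := (PySem.Set.mem_ofList _ _).mpr (by simp)
    rw [List.map_eq_nil_iff] at h
    simp [h] at hb0
  obtain ⟨m, hm⟩ : ∃ m, PySem.List.max? (PySem.Dict.counter (b0 :: t)).values (fun v => v) = some m := by
    cases hmx : PySem.List.max? (PySem.Dict.counter (b0 :: t)).values (fun v => v) with
    | none => exact absurd ((PySem.List.max?_eq_none_iff _ _).mp hmx) hne
    | some m => exact ⟨m, rfl⟩
  rw [hm]
  dsimp only
  -- facts about m
  have hmem : m ∈ (PySem.Dict.counter (b0 :: t)).values := PySem.List.max?_mem hm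
  obtain ⟨k, hk, hkm⟩ : ∃ k, k ∈ (b0 :: t) ∧ (((b0 :: t).count k : Nat) : Int) = m := by
    rw [hval] at hmem
    obtain ⟨k, hk, hkm⟩ := List.mem_map.mp hmem
    exact ⟨k, (PySem.Set.mem_ofList _ _).mp hk, hkm⟩
  have hmax : ∀ b, (((b0 :: t).count b : Nat) : Int) ≤ m := by
    intro b
    by_cases hb : b ∈ (b0 :: t)
    · have : (((b0 :: t).count b : Nat) : Int) ∈ (PySem.Dict.counter (b0 :: t)).values := by
        rw [hval]; exact List.mem_map.mpr ⟨b, (PySem.Set.mem_ofList _ _).mpr hb, rfl⟩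
      exact PySem.List.max?_isMax hm _ this
    · have hpos : 1 ≤ (b0 :: t).count k := List.one_le_count_iff.mpr hk
      have : (b0 :: t).count b = 0 := List.count_eq_zero.mpr hb
      rw [this]; push_cast; omega
  have hm1 : 1 ≤ m := by
    have hpos : 1 ≤ (b0 :: t).count k := List.one_le_count_iff.mpr hk
    omega
  -- rewrite both sides through the pure loops
  have hinv0 : ∀ b, (PySem.Dict.empty : PySem.Dict String Int).getD b 0 = (([] : List String).count b : Int) := by
    intro b; simp
  rw [pvGoA_eq_foldl (b0 :: t) _ [] b0 0 hinv0,
      pvLocP_eq_pvLocate m (b0 :: t) _ [] hinv0]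
  have hub : ∀ b, ((([] : List String).count b + (b0 :: t).count b : Nat) : Int) ≤ m := by
    intro b; simpa using hmax b
  have hsome : (pvLocP m [] (b0 :: t)).isSome :=
    pvLocP_isSome m (b0 :: t) [] ⟨k, by simpa using hm1, by simpa using hkm.ge⟩
  have := pvGoA_eq_pvLocP m (b0 :: t) [] b0 0 (by intro b; simp) hm1 hub hsome
  rw [this]
  rfl
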